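-- pv_equiv track=rewrite | github.com/Jason020310/112cp1 | practice/d235.py | is_eleven
-- ===== SOURCE A (Python) =====
-- def is_eleven(num):
--     num = str(num)[::-1]
--     odd_sum = 0
--     even_sum = 0
--     n = 0
--     while n < len(num):
--         odd_sum += int(num[n])
--         if n + 1 >= len(num):
--             break
--         even_sum += int(num[n + 1])
--         n += 2
--     diff = odd_sum - even_sum
--     if diff < 0:
--         diff = -diff
--     if diff % 11 == 0:
--         return True
--     else:
--         return False
-- ===== SOURCE B (Python) =====
-- def is_eleven(num):
--     rem = 0
--     for c in str(num):
--         rem = (rem * 10 + int(c)) % 11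
--     return rem == 0
-- ===== Notes on version B (the rewrite author's own statement) =====
-- stated objective: idiomatic
-- what changed: B computes num mod 11 by a left-to-right Horner running remainder over the decimal string instead of reversing the string and comparing alternating digit sums.
import Mathlib
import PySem

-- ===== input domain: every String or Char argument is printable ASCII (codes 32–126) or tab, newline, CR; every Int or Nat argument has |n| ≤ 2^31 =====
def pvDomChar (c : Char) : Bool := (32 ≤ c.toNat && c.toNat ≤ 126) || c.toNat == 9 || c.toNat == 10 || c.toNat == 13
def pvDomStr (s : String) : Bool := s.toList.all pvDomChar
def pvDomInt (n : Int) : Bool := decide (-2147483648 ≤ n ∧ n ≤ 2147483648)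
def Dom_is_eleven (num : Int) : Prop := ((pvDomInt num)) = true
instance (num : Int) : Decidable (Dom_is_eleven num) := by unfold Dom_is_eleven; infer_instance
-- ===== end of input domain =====

-- B replaces A's reverse-and-alternating-digit-sum test with an idiomatic left-to-right
-- Horner running remainder mod 11 over the decimal string; same result on all num ≥ 0.


-- ===== PORT A =====
-- int(c) for a single character c; `.getD 0` is unreachable inside Pre_ (digits only)
def pyDigit (c : Char) : Int := (PySem.Int.ofStr? (String.ofList [c])).getD 0

-- the while loop: reads num[n], breaks if n+1 is past the end, else also reads num[n+1], n += 2;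
-- transliterated as consuming the (reversed) character list two at a time with the same (odd_sum, even_sum) state
def isElevenLoop : List Char → Int → Int → Int × Int
  | [], odd_sum, even_sum => (odd_sum, even_sum)
  | [c], odd_sum, even_sum => (odd_sum + pyDigit c, even_sum)
  | c1 :: c2 :: t, odd_sum, even_sum => isElevenLoop t (odd_sum + pyDigit c1) (even_sum + pyDigit c2)

def is_eleven (num : Int) : Bool :=
  let s := (PySem.Int.toStr num).toList.reverse   -- num = str(num)[::-1]
  let r := isElevenLoop s 0 0
  let diff := r.1 - r.2
  let diff := if diff < 0 then -diff else diff
  if diff % 11 == 0 then true else false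

-- ===== PORT B =====
def is_eleven_alt (num : Int) : Bool :=
  let rem := (PySem.Int.toStr num).toList.foldl (fun rem c => (rem * 10 + pyDigit c) % 11) 0
  rem == 0

-- ===== PRECONDITION & SPEC =====
-- Pre_ excludes negative num: str(num) then contains '-', on which int() raises ValueError in A (and in B).
def Pre_is_eleven (num : Int) : Prop := 0 ≤ num
instance (num : Int) : Decidable (Pre_is_eleven num) := by unfold Pre_is_eleven; infer_instance
def pvWitness_is_eleven : Int := (121)
def Spec_is_eleven (num : Int) (out : Bool) : Prop := out = is_eleven_alt num
instance (num : Int) (out : Bool) : Decidable (Spec_is_eleven num out) := by unfold Spec_is_eleven; infer_instance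

-- ===== CLAIM (what is proved, stated in full; the proofs are below) =====
def Claim_equal_is_eleven : Prop := ∀ (num : Int), Dom_is_eleven num → Pre_is_eleven num → Spec_is_eleven num (is_eleven num)

-- ===== LEMMAS AND PROOFS =====

-- the alternating (lsb-first) signed digit sum
def altSum : List Char → Int
  | [] => 0
  | c :: t => pyDigit c - altSum t

-- A's loop computes odd_sum - even_sum = altSum of its input
theorem isElevenLoop_diff : ∀ (l : List Char) (os es : Int),
    (isElevenLoop l os es).1 - (isElevenLoop l os es).2 = os - es + altSum l
  | [], os, es => by simp [isElevenLoop, altSum]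
  | [c], os, es => by simp [isElevenLoop, altSum]; ring
  | c1 :: c2 :: t, os, es => by
    have ih := isElevenLoop_diff t (os + pyDigit c1) (es + pyDigit c2)
    simp only [isElevenLoop, altSum] at ih ⊢
    omega

-- B's fold is the plain base-10 value fold, reduced mod 11
theorem horner_mod : ∀ (cs : List Char) (r : Int),
    cs.foldl (fun rem c => (rem * 10 + pyDigit c) % 11) (r % 11)
      = (cs.foldl (fun a c => a * 10 + pyDigit c) r) % 11 := by
  intro cs
  induction cs with
  | nil => intro r; simp
  | cons c t ih =>
    intro r
    have h : (r % 11 * 10 + pyDigit c) % 11 = (r * 10 + pyDigit c) % 11 := by omega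
    simpa [h] using ih (r * 10 + pyDigit c)

-- 10 ≡ -1 (mod 11): the value of the digit string agrees mod 11 with the lsb-first alternating sum
theorem value_mod_eq_altSum_mod : ∀ (l : List Char),
    (l.reverse.foldl (fun a c => a * 10 + pyDigit c) 0) % 11 = altSum l % 11 := by
  intro l
  induction l with
  | nil => simp [altSum]
  | cons c t ih => simp only [List.reverse_cons, List.foldl_append, List.foldl_cons,
      List.foldl_nil, altSum]; omega

-- ===== VERDICT (by name: the statement is the Claim_ definition above) =====
theorem is_eleven_spec : Claim_equal_is_eleven := by
  intro num _ _
  unfold Spec_is_eleven is_eleven is_eleven_alt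
  set cs := (PySem.Int.toStr num).toList with hcs
  have hd := isElevenLoop_diff cs.reverse 0 0
  have hh := horner_mod cs 0
  have hv := value_mod_eq_altSum_mod cs.reverse
  simp only [List.reverse_reverse] at hv
  simp only [Int.zero_emod] at hh
  rw [hh]
  rw [show (0:Int) - 0 + altSum cs.reverse = altSum cs.reverse by ring] at hd
  -- both sides decided by the mod-11 facts hd, hv
  rcases h : isElevenLoop cs.reverse 0 0 with ⟨os, es⟩
  rw [h] at hd
  have hos : os - es = altSum cs.reverse := by omega
  simp only [h]
  rw [hv, hos]
  split_ifs <;> simp_all
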